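-- pv_equiv track=rewrite | github.com/Nandith-Narayan/16BitCPU | scripts/generate_decoder_EEPROM_data.py | make_control_words
-- ===== SOURCE A (Python) =====
-- def make_control_words(enable_bits):
--     control_word = [0]*24
--     for bit in enable_bits:
--         control_word[bit] = 1
--
--
--     control_word = ("".join([str(i) for i in control_word]))
--     byte_1 = int(control_word[:8][::-1],2)
--     byte_2 = int(control_word[8:16][::-1],2)
--     byte_3 = int(control_word[16:24][::-1],2)
--
--
--     return (byte_1&0x0FF, byte_2&0x0FF, byte_3&0x0FF)
-- ===== SOURCE B (Python) =====
-- def make_control_words(enable_bits):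
--     control_word = [0] * 24
--     for bit in enable_bits:
--         control_word[bit] = 1
--     byte_1 = sum(b * 2 ** i for i, b in enumerate(control_word[:8]))
--     byte_2 = sum(b * 2 ** i for i, b in enumerate(control_word[8:16]))
--     byte_3 = sum(b * 2 ** i for i, b in enumerate(control_word[16:24]))
--     return (byte_1, byte_2, byte_3)
-- ===== Notes on version B (the rewrite author's own statement) =====
-- stated objective: simpler
-- what changed: Replaces A's string round-trip (join digits to a 24-char string, slice, reverse, parse base 2, mask with 0xFF) by direct arithmetic: each byte is the weighted sum b*2**i over its 8-entry slice, no strings and no masking; the bit-setting loop is kept so index behaviour is identical.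
import Mathlib
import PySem

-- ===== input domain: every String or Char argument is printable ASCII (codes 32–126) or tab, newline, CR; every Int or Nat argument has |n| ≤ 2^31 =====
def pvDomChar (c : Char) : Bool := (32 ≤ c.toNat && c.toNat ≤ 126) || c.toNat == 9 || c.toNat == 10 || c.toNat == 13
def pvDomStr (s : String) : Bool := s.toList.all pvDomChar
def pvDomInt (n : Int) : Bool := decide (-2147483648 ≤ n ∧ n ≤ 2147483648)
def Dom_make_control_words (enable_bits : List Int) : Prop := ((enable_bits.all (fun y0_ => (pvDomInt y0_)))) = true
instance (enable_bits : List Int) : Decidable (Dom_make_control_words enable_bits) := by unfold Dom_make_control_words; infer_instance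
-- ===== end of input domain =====

-- B replaces A's string round-trip (join, slice, reverse, int(_,2), & 0xFF) by a direct
-- weighted sum over each 8-entry slice; the bit-setting loop is unchanged. Objective: simpler.

-- ===== PORT A =====
-- the loop 'for bit in enable_bits: control_word[bit] = 1'; none = IndexError (excluded by Pre_)
def pvSetBitsA (cw : List Int) (bits : List Int) : Option (List Int) :=
  match bits with
  | [] => some cw
  | b :: rest =>
    match PySem.List.pySet? cw b (1 : Int) with
    | none => none
    | some cw' => pvSetBitsA cw' rest

-- t[::-1]; step -1 never yields none, so getD "" is unreachable
def pvRev (t : String) : String := (PySem.Str.slice? t none none (-1)).getD ""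

-- int(t, 2); here t is always 8 binary digits, so the ValueError branch (getD 0) is unreachable
def pvInt2 (t : String) : Int := (PySem.Int.ofStrBase? t 2).getD 0

def make_control_words (enable_bits : List Int) : Int × Int × Int :=
  match pvSetBitsA (List.replicate 24 (0 : Int)) enable_bits with
  | none => (0, 0, 0)   -- Python raises IndexError here; excluded by Pre_
  | some cw =>
    let s := PySem.Str.join "" (cw.map PySem.Int.toStr)
    let byte_1 := pvInt2 (pvRev (PySem.Str.slice s none (some 8)))
    let byte_2 := pvInt2 (pvRev (PySem.Str.slice s (some 8) (some 16)))
    let byte_3 := pvInt2 (pvRev (PySem.Str.slice s (some 16) (some 24)))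
    (PySem.Int.band byte_1 0xFF, PySem.Int.band byte_2 0xFF, PySem.Int.band byte_3 0xFF)

-- ===== PORT B =====
-- the same Python loop in Source B
def pvSetBitsB (cw : List Int) (bits : List Int) : Option (List Int) :=
  match bits with
  | [] => some cw
  | b :: rest =>
    match PySem.List.pySet? cw b (1 : Int) with
    | none => none
    | some cw' => pvSetBitsB cw' rest

-- sum(b * 2 ** i for i, b in enumerate(chunk)); i from enumerate is ≥ 0, so 2 ** i = 2 ^ i.toNat
def pvByte (chunk : List Int) : Int :=
  (PySem.List.enumerate chunk 0).foldl (fun acc p => acc + p.2 * 2 ^ p.1.toNat) 0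

def make_control_words_alt (enable_bits : List Int) : Int × Int × Int :=
  match pvSetBitsB (List.replicate 24 (0 : Int)) enable_bits with
  | none => (0, 0, 0)   -- Python raises IndexError here; excluded by Pre_
  | some cw =>
    (pvByte (PySem.List.slice cw none (some 8)),
     pvByte (PySem.List.slice cw (some 8) (some 16)),
     pvByte (PySem.List.slice cw (some 16) (some 24)))

-- ===== PRECONDITION & SPEC =====
-- Pre_: exactly the inputs where Python A returns (any out-of-range index raises IndexError)
def Pre_make_control_words (enable_bits : List Int) : Prop :=
  ∀ b ∈ enable_bits, -24 ≤ b ∧ b < 24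
instance (enable_bits : List Int) : Decidable (Pre_make_control_words enable_bits) := by
  unfold Pre_make_control_words; infer_instance

def pvWitness_make_control_words : List Int := [0, 5, -1, 23]

def Spec_make_control_words (enable_bits : List Int) (out : Int × Int × Int) : Prop :=
  out = make_control_words_alt enable_bits
instance (enable_bits : List Int) (out : Int × Int × Int) : Decidable (Spec_make_control_words enable_bits out) := by
  unfold Spec_make_control_words; infer_instance

-- ===== CLAIM (what is proved, stated in full; the proofs are below) =====
def Claim_equal_make_control_words : Prop := ∀ (enable_bits : List Int), Dom_make_control_words enable_bits → Pre_make_control_words enable_bits → Spec_make_control_words enable_bits (make_control_words enable_bits)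

-- ===== LEMMAS AND PROOFS =====

-- the two loops are the same fold
theorem setBits_eq (bits cw : List Int) : pvSetBitsB cw bits = pvSetBitsA cw bits := by
  induction bits generalizing cw with
  | nil => rfl
  | cons b rest ih =>
    simp only [pvSetBitsA, pvSetBitsB]
    cases PySem.List.pySet? cw b (1 : Int) with
    | none => rfl
    | some cw' => exact ih cw'

-- the loop preserves length and keeps every entry 0 or 1
theorem setBits_inv (bits : List Int) (cw cw' : List Int)
    (h01 : ∀ x ∈ cw, x = 0 ∨ x = 1)
    (h : pvSetBitsA cw bits = some cw') :
    cw'.length = cw.length ∧ ∀ x ∈ cw', x = 0 ∨ x = 1 := by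
  induction bits generalizing cw with
  | nil => simp only [pvSetBitsA, Option.some.injEq] at h; subst h; exact ⟨rfl, h01⟩
  | cons b rest ih =>
    simp only [pvSetBitsA] at h
    cases hset : PySem.List.pySet? cw b (1 : Int) with
    | none => rw [hset] at h; exact absurd h (by simp)
    | some cw2 =>
      rw [hset] at h
      obtain ⟨k, -, rfl⟩ := Option.map_eq_some_iff.mp hset
      have h01' : ∀ x ∈ cw.set k 1, x = 0 ∨ x = 1 := by
        intro x hx
        rcases List.mem_or_eq_of_mem_set hx with hx' | rfl
        · exact h01 x hx'
        · right; rfl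
      have := ih (cw.set k 1) h01' h
      simpa using this

-- str(a) for a ∈ {0,1} is the one binary digit char
def pvCh (a : Int) : Char := if a = 1 then '1' else '0'

theorem toStr01 (a : Int) (h : a = 0 ∨ a = 1) :
    PySem.Int.toStr a = String.ofList [pvCh a] := by
  rcases h with rfl | rfl <;> decide

-- the per-byte core: parsing the reversed 8-digit string, masked with 0xFF, equals the weighted sum
theorem byte8 (a0 a1 a2 a3 a4 a5 a6 a7 : Int) (t : String)
    (ht : t.toList = [pvCh a0, pvCh a1, pvCh a2, pvCh a3, pvCh a4, pvCh a5, pvCh a6, pvCh a7])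
    (h0 : a0 = 0 ∨ a0 = 1) (h1 : a1 = 0 ∨ a1 = 1) (h2 : a2 = 0 ∨ a2 = 1)
    (h3 : a3 = 0 ∨ a3 = 1) (h4 : a4 = 0 ∨ a4 = 1) (h5 : a5 = 0 ∨ a5 = 1)
    (h6 : a6 = 0 ∨ a6 = 1) (h7 : a7 = 0 ∨ a7 = 1) :
    PySem.Int.band (pvInt2 (pvRev t)) 0xFF = pvByte [a0, a1, a2, a3, a4, a5, a6, a7] := by
  unfold pvRev pvInt2
  rw [PySem.Str.slice?_none_none_neg_one, Option.getD_some, ht,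
    PySem.Int.ofStrBase?_ofList]
  rcases h0 with rfl | rfl <;> rcases h1 with rfl | rfl <;> rcases h2 with rfl | rfl <;>
    rcases h3 with rfl | rfl <;> rcases h4 with rfl | rfl <;> rcases h5 with rfl | rfl <;>
    rcases h6 with rfl | rfl <;> rcases h7 with rfl | rfl <;> decide

-- join "" of the digit strings is the string of digit chars
theorem join01 (cw : List Int) (h01 : ∀ x ∈ cw, x = 0 ∨ x = 1) :
    (PySem.Str.join "" (cw.map PySem.Int.toStr)).toList = cw.map pvCh := by
  rw [PySem.Str.toList_join]
  have hmap : (cw.map PySem.Int.toStr).map String.toList = (cw.map pvCh).map (fun c => [c]) := by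
    induction cw with
    | nil => rfl
    | cons a rest ih =>
      simp only [List.map_cons, List.cons.injEq]
      refine ⟨?_, ih (fun x hx => h01 x (List.mem_cons_of_mem a hx))⟩
      rw [toStr01 a (h01 a (List.mem_cons_self))]
      simp
  rw [hmap]
  exact PySem.Chars.join_nil_singletons _

-- a length-24 list is a literal of 24 elements
theorem list24 (l : List Int) (h : l.length = 24) :
    ∃ a0 a1 a2 a3 a4 a5 a6 a7 a8 a9 a10 a11 a12 a13 a14 a15 a16 a17 a18 a19 a20 a21 a22 a23,
      l = [a0, a1, a2, a3, a4, a5, a6, a7, a8, a9, a10, a11, a12, a13, a14, a15, a16, a17, a18, a19, a20, a21, a22, a23] := by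
  match l, h with
  | [a0, a1, a2, a3, a4, a5, a6, a7, a8, a9, a10, a11, a12, a13, a14, a15, a16, a17, a18, a19, a20, a21, a22, a23], _ =>
    exact ⟨_, _, _, _, _, _, _, _, _, _, _, _, _, _, _, _, _, _, _, _, _, _, _, _, rfl⟩

theorem main_lemma (cw : List Int) (hlen : cw.length = 24) (h01 : ∀ x ∈ cw, x = 0 ∨ x = 1) :
    (PySem.Int.band (pvInt2 (pvRev (PySem.Str.slice (PySem.Str.join "" (cw.map PySem.Int.toStr)) none (some 8)))) 0xFF,
     PySem.Int.band (pvInt2 (pvRev (PySem.Str.slice (PySem.Str.join "" (cw.map PySem.Int.toStr)) (some 8) (some 16)))) 0xFF,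
     PySem.Int.band (pvInt2 (pvRev (PySem.Str.slice (PySem.Str.join "" (cw.map PySem.Int.toStr)) (some 16) (some 24)))) 0xFF)
      = (pvByte (PySem.List.slice cw none (some 8)),
         pvByte (PySem.List.slice cw (some 8) (some 16)),
         pvByte (PySem.List.slice cw (some 16) (some 24))) := by
  obtain ⟨a0, a1, a2, a3, a4, a5, a6, a7, a8, a9, a10, a11, a12, a13, a14, a15, a16, a17, a18, a19, a20, a21, a22, a23, rfl⟩ := list24 cw hlen
  have hs := join01 _ h01
  have hc : ∀ x ∈ ([a0, a1, a2, a3, a4, a5, a6, a7, a8, a9, a10, a11, a12, a13, a14, a15, a16, a17, a18, a19, a20, a21, a22, a23] : List Int), x = 0 ∨ x = 1 := h01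
  simp only [List.mem_cons, List.not_mem_nil, or_false, forall_eq_or_imp, forall_eq] at hc
  obtain ⟨h0, h1, h2, h3, h4, h5, h6, h7, h8, h9, h10, h11, h12, h13, h14, h15, h16, h17, h18, h19, h20, h21, h22, h23⟩ := hc
  simp only [Prod.mk.injEq]
  refine ⟨?_, ?_, ?_⟩
  · rw [byte8 a0 a1 a2 a3 a4 a5 a6 a7 _
      (by rw [PySem.Str.toList_slice, PySem.Chars.slice_eq_listSlice,
              PySem.List.slice_to _ (by norm_num : (0:Int) ≤ 8), hs]; rfl) h0 h1 h2 h3 h4 h5 h6 h7,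
      PySem.List.slice_to _ (by norm_num : (0:Int) ≤ 8)]
    rfl
  · rw [byte8 a8 a9 a10 a11 a12 a13 a14 a15 _
      (by rw [PySem.Str.toList_slice, PySem.Chars.slice_eq_listSlice,
              PySem.List.slice_toNat _ (by norm_num : (0:Int) ≤ 8) (by norm_num : (0:Int) ≤ 16), hs]; rfl) h8 h9 h10 h11 h12 h13 h14 h15,
      PySem.List.slice_toNat _ (by norm_num : (0:Int) ≤ 8) (by norm_num : (0:Int) ≤ 16)]
    rfl
  · rw [byte8 a16 a17 a18 a19 a20 a21 a22 a23 _
      (by rw [PySem.Str.toList_slice, PySem.Chars.slice_eq_listSlice,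
              PySem.List.slice_toNat _ (by norm_num : (0:Int) ≤ 16) (by norm_num : (0:Int) ≤ 24), hs]; rfl) h16 h17 h18 h19 h20 h21 h22 h23,
      PySem.List.slice_toNat _ (by norm_num : (0:Int) ≤ 16) (by norm_num : (0:Int) ≤ 24)]
    rfl

-- ===== VERDICT (by name: the statement is the Claim_ definition above) =====
theorem make_control_words_spec : Claim_equal_make_control_words := by
  intro bits _ hpre
  unfold Spec_make_control_words make_control_words make_control_words_alt
  rw [setBits_eq]
  cases h : pvSetBitsA (List.replicate 24 (0 : Int)) bits with
  | none => rfl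
  | some cw =>
    obtain ⟨hlen, h01⟩ := setBits_inv bits _ cw (by simp) h
    exact main_lemma cw (by simpa using hlen) h01
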